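-- pv_equiv track=rewrite | github.com/IAOCEA/healpix-convolution | healpix_convolution/neighbours.py | generate_offsets
-- ===== SOURCE A (Python) =====
-- def generate_offsets(ring):
--     steps = [(0, 1), (1, 0), (0, -1), (-1, 0), (0, 1)]
--     cx = 0
--     cy = 0
--
--     for c in range(ring + 1):
--         # 1: go c steps to the left and yield
--         # 2: turn right
--         # 3: go 1 step at a time while yielding, until we reach the maximum distance
--         # 4: repeat 2 and 3 until we turned 4 times
--         # 5: go up until just before we reached the first point
--         x = cx - c
--         y = cy - 0
--
--         yield x, y
--
--         if c == 0:
--             continue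
--
--         for index, (sx, sy) in enumerate(steps):
--             if index == 0:
--                 n_steps = c
--             elif index == 4:
--                 n_steps = c - 1
--             else:
--                 n_steps = 2 * c
--
--             for _ in range(n_steps):
--                 x = x + sx
--                 y = y + sy
--
--                 yield (x, y)
-- ===== SOURCE B (Python) =====
-- def generate_offsets(ring):
--     for c in range(ring + 1):
--         if c == 0:
--             yield (0, 0)
--             continue
--         for y in range(0, c + 1):
--             yield (-c, y)
--         for x in range(-c + 1, c + 1):
--             yield (x, c)
--         for y in range(c - 1, -c - 1, -1):
--             yield (c, y)
--         for x in range(c - 1, -c - 1, -1):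
--             yield (x, -c)
--         for y in range(-c + 1, 0):
--             yield (-c, y)
-- ===== Notes on version B (the rewrite author's own statement) =====
-- stated objective: simpler
-- what changed: Replaced the stepped (x,y) accumulator threaded through a direction/step-count table with direct per-edge coordinate emission: each of the five edges of ring c is generated straight from range bounds.
import Mathlib
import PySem

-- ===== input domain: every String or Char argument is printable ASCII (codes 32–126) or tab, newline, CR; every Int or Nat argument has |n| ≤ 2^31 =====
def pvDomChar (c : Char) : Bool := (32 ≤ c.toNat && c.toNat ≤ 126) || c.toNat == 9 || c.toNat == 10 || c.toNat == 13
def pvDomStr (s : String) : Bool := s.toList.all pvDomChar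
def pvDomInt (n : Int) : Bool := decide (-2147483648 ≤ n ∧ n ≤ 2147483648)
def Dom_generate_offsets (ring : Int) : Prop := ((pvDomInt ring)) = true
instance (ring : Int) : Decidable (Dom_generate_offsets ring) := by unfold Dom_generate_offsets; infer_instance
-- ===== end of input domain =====

-- B replaces A's stepped (x,y) accumulator and direction table with direct per-edge
-- coordinate emission from range bounds (objective: simpler); return values are equal.

-- ===== PORT A =====
def generate_offsets (ring : Int) : List (Int × Int) :=
  let steps : List (Int × Int) := [(0, 1), (1, 0), (0, -1), (-1, 0), (0, 1)]
  let cx : Int := 0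
  let cy : Int := 0
  (PySem.List.pyRange 0 (ring + 1) 1).foldl (fun acc c =>
    let x := cx - c
    let y := cy - 0
    let acc := acc ++ [(x, y)]
    if c == 0 then acc
    else
      ((PySem.List.enumerate steps 0).foldl
        (fun (st : List (Int × Int) × Int × Int) isxy =>
          let n_steps : Int :=
            if isxy.1 == 0 then c else if isxy.1 == 4 then c - 1 else 2 * c
          (PySem.List.pyRange 0 n_steps 1).foldl
            (fun (st2 : List (Int × Int) × Int × Int) _ =>
              (st2.1 ++ [(st2.2.1 + isxy.2.1, st2.2.2 + isxy.2.2)],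
               st2.2.1 + isxy.2.1, st2.2.2 + isxy.2.2))
            st)
        (acc, x, y)).1) []

-- ===== PORT B =====
def generate_offsets_alt (ring : Int) : List (Int × Int) :=
  (PySem.List.pyRange 0 (ring + 1) 1).foldl (fun acc c =>
    if c == 0 then acc ++ [(0, 0)]
    else acc
      ++ (PySem.List.pyRange 0 (c + 1) 1).map (fun y => (-c, y))
      ++ (PySem.List.pyRange (-c + 1) (c + 1) 1).map (fun x => (x, c))
      ++ (PySem.List.pyRange (c - 1) (-c - 1) (-1)).map (fun y => (c, y))
      ++ (PySem.List.pyRange (c - 1) (-c - 1) (-1)).map (fun x => (x, -c))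
      ++ (PySem.List.pyRange (-c + 1) 0 1).map (fun y => (-c, y))) []

-- ===== PRECONDITION & SPEC =====
def Spec_generate_offsets (ring : Int) (out : List (Int × Int)) : Prop := out = generate_offsets_alt ring
instance (ring : Int) (out : List (Int × Int)) : Decidable (Spec_generate_offsets ring out) := by unfold Spec_generate_offsets; infer_instance

-- ===== CLAIM (what is proved, stated in full; the proofs are below) =====
def Claim_equal_generate_offsets : Prop := ∀ (ring : Int), Dom_generate_offsets ring → Spec_generate_offsets ring (generate_offsets ring)

-- ===== LEMMAS AND PROOFS =====

-- one constant-step segment of A's walk: m steps of (sx, sy) from (x, y)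
theorem pv_segFold (sx sy : Int) (m : Nat) :
    ∀ (acc : List (Int × Int)) (x y : Int),
    (List.range m).foldl
      (fun (st2 : List (Int × Int) × Int × Int) (_ : Nat) =>
        (st2.1 ++ [(st2.2.1 + sx, st2.2.2 + sy)], st2.2.1 + sx, st2.2.2 + sy))
      (acc, x, y)
    = (acc ++ (List.range m).map (fun (i : Nat) => (x + sx * ((i : Int) + 1), y + sy * ((i : Int) + 1))),
       x + sx * m, y + sy * m) := by
  induction m with
  | zero => intro acc x y; simp
  | succ m ih =>
    intro acc x y
    rw [List.range_succ, List.foldl_append, ih]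
    simp only [List.foldl_cons, List.foldl_nil, List.map_append, List.map_cons, List.map_nil,
      List.append_assoc, Prod.mk.injEq, Nat.cast_add, Nat.cast_one]
    refine ⟨by ring_nf, by ring, by ring⟩

-- pv_segFold stated over the pyRange the port actually folds over
theorem pv_segFoldI (sx sy n : Int) (acc : List (Int × Int)) (x y : Int) :
    (PySem.List.pyRange 0 n 1).foldl
      (fun (st2 : List (Int × Int) × Int × Int) (_ : Int) =>
        (st2.1 ++ [(st2.2.1 + sx, st2.2.2 + sy)], st2.2.1 + sx, st2.2.2 + sy))
      (acc, x, y)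
    = (acc ++ (List.range n.toNat).map
        (fun (i : Nat) => (x + sx * ((i : Int) + 1), y + sy * ((i : Int) + 1))),
       x + sx * n.toNat, y + sy * n.toNat) := by
  rw [PySem.List.pyRange_one, List.foldl_map]
  simp only [Int.sub_zero]
  exact pv_segFold sx sy n.toNat acc x y

-- the four concrete step directions, in the shape norm_num leaves in the goal
theorem pv_segUp (n : Int) (acc : List (Int × Int)) (x y : Int) :
    (PySem.List.pyRange 0 n 1).foldl
      (fun (st2 : List (Int × Int) × Int × Int) (_ : Int) =>
        (st2.1 ++ [(st2.2.1, st2.2.2 + 1)], st2.2.1, st2.2.2 + 1)) (acc, x, y)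
    = (acc ++ (List.range n.toNat).map (fun (i : Nat) => (x, y + ((i : Int) + 1))),
       x, y + n.toNat) := by
  have h := pv_segFoldI 0 1 n acc x y
  simpa using h

theorem pv_segRight (n : Int) (acc : List (Int × Int)) (x y : Int) :
    (PySem.List.pyRange 0 n 1).foldl
      (fun (st2 : List (Int × Int) × Int × Int) (_ : Int) =>
        (st2.1 ++ [(st2.2.1 + 1, st2.2.2)], st2.2.1 + 1, st2.2.2)) (acc, x, y)
    = (acc ++ (List.range n.toNat).map (fun (i : Nat) => (x + ((i : Int) + 1), y)),
       x + n.toNat, y) := by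
  have h := pv_segFoldI 1 0 n acc x y
  simpa using h

theorem pv_segDown (n : Int) (acc : List (Int × Int)) (x y : Int) :
    (PySem.List.pyRange 0 n 1).foldl
      (fun (st2 : List (Int × Int) × Int × Int) (_ : Int) =>
        (st2.1 ++ [(st2.2.1, st2.2.2 + -1)], st2.2.1, st2.2.2 + -1)) (acc, x, y)
    = (acc ++ (List.range n.toNat).map (fun (i : Nat) => (x, y - ((i : Int) + 1))),
       x, y - n.toNat) := by
  have h := pv_segFoldI 0 (-1) n acc x y
  simpa [sub_eq_add_neg] using h

theorem pv_segLeft (n : Int) (acc : List (Int × Int)) (x y : Int) :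
    (PySem.List.pyRange 0 n 1).foldl
      (fun (st2 : List (Int × Int) × Int × Int) (_ : Int) =>
        (st2.1 ++ [(st2.2.1 + -1, st2.2.2)], st2.2.1 + -1, st2.2.2)) (acc, x, y)
    = (acc ++ (List.range n.toNat).map (fun (i : Nat) => (x - ((i : Int) + 1), y)),
       x - n.toNat, y) := by
  have h := pv_segFoldI (-1) 0 n acc x y
  simpa [sub_eq_add_neg] using h

theorem pv_body_eq (c : Int) (hc : 0 ≤ c) (acc : List (Int × Int)) :
    (let steps : List (Int × Int) := [(0, 1), (1, 0), (0, -1), (-1, 0), (0, 1)]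
     let x := 0 - c
     let y := (0 : Int) - 0
     let acc' := acc ++ [(x, y)]
     if c == 0 then acc'
     else
       ((PySem.List.enumerate steps 0).foldl
         (fun (st : List (Int × Int) × Int × Int) isxy =>
           let n_steps : Int :=
             if isxy.1 == 0 then c else if isxy.1 == 4 then c - 1 else 2 * c
           (PySem.List.pyRange 0 n_steps 1).foldl
             (fun (st2 : List (Int × Int) × Int × Int) _ =>
               (st2.1 ++ [(st2.2.1 + isxy.2.1, st2.2.2 + isxy.2.2)],
                st2.2.1 + isxy.2.1, st2.2.2 + isxy.2.2))
             st)
         (acc', x, y)).1)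
    = (if c == 0 then acc ++ [(0, 0)]
       else acc
         ++ (PySem.List.pyRange 0 (c + 1) 1).map (fun y => (-c, y))
         ++ (PySem.List.pyRange (-c + 1) (c + 1) 1).map (fun x => (x, c))
         ++ (PySem.List.pyRange (c - 1) (-c - 1) (-1)).map (fun y => (c, y))
         ++ (PySem.List.pyRange (c - 1) (-c - 1) (-1)).map (fun x => (x, -c))
         ++ (PySem.List.pyRange (-c + 1) 0 1).map (fun y => (-c, y))) := by
  by_cases h0 : c = 0
  · subst h0; simp
  · have hc1 : 1 ≤ c := by omega
    lift c to ℕ using hc with n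
    have hn1 : 1 ≤ n := by exact_mod_cast hc1
    simp only [beq_iff_eq, if_neg h0]
    simp only [PySem.List.enumerate_cons, PySem.List.enumerate_nil, List.foldl_cons,
      List.foldl_nil]
    norm_num
    rw [pv_segUp, pv_segRight, pv_segDown, pv_segLeft, pv_segUp]
    have h2 : (2 * ((n : Int))).toNat = 2 * n := by omega
    have hm1 : (((n : Int)) - 1).toNat = n - 1 := by omega
    have hb1 : (((n : Int)) + 1 - 0).toNat = n + 1 := by omega
    have hb2 : (((n : Int)) + 1 - (-((n : Int)) + 1)).toNat = 2 * n := by omega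
    have hb3 : (((n : Int)) - 1 - (-((n : Int)) - 1)).toNat = 2 * n := by omega
    have hb4 : ((0 : Int) - (-((n : Int)) + 1)).toNat = n - 1 := by omega
    simp only [PySem.List.pyRange_one, PySem.List.pyRange_neg_one, h2, hm1, hb1, hb2, hb3, hb4,
      Int.toNat_natCast, List.map_map]
    simp only [List.range_succ_eq_map, List.map_map, List.map_cons, List.cons_append,
      List.append_assoc, List.nil_append]
    congr 1
    congr 1
    refine congrArg₂ (· ++ ·) ?_ (congrArg₂ (· ++ ·) ?_ (congrArg₂ (· ++ ·) ?_
      (congrArg₂ (· ++ ·) ?_ ?_)))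
    all_goals
      apply List.map_congr_left
      intro i hi
      simp only [Function.comp, Prod.mk.injEq]
      push_cast
      first
      | omega
      | exact ⟨trivial, rfl⟩

theorem generate_offsets_spec : Claim_equal_generate_offsets := by
  intro ring _
  unfold Spec_generate_offsets generate_offsets generate_offsets_alt
  apply PySem.List.foldl_congr_mem
  intro acc c hmem
  have hc : 0 ≤ c := (PySem.List.mem_pyRange_one.1 hmem).1
  exact pv_body_eq c hc acc
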